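-- pv_equiv track=rewrite | github.com/NimanthaFernando/NPD_firewall | main(updated).py | _categorize_log_content
-- ===== SOURCE A (Python) =====
-- def _categorize_log_content(log_content):
--     """Categorize log content into sections based on packet type."""
--     categorized_log = {
--         "ICMP": [],
--         "TCP": [],
--         "UDP": [],
--         "Other": []
--     }
--
--     # Split the log into lines and categorize based on packet type
--     log_lines = log_content.splitlines()
--     for line in log_lines:
--         if "ICMP" in line:
--             categorized_log["ICMP"].append(line)
--         elif "TCP" in line:
--             categorized_log["TCP"].append(line)
--         elif "UDP" in line:
--             categorized_log["UDP"].append(line)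
--         else:
--             categorized_log["Other"].append(line)
--
--     # Build the final categorized log content
--     categorized_log_content = ""
--
--     for category, lines in categorized_log.items():
--         if lines:
--             categorized_log_content += f"\n--- {category} Packets ---\n"
--             categorized_log_content += "\n".join(lines) + "\n"
--
--     return categorized_log_content
-- ===== SOURCE B (Python) =====
-- def _classify(line):
--     for cat in ("ICMP", "TCP", "UDP"):
--         if cat in line:
--             return cat
--     return "Other"
--
--
-- def _section(labelled, cat):
--     lines = [line for c, line in labelled if c == cat]
--     if lines:
--         return f"\n--- {cat} Packets ---\n" + "\n".join(lines) + "\n"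
--     return ""
--
--
-- def _categorize_log_content(log_content):
--     """Categorize log content into sections based on packet type."""
--     labelled = [(_classify(line), line) for line in log_content.splitlines()]
--     return "".join(_section(labelled, cat) for cat in ("ICMP", "TCP", "UDP", "Other"))
-- ===== Notes on version B (the rewrite author's own statement) =====
-- stated objective: alternative
-- what changed: Replaces the single accumulating pass into four mutable dict buckets with a pure classify-label pass producing (category, line) pairs, followed by per-category filter passes whose section strings are joined at the end.
import Mathlib
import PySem

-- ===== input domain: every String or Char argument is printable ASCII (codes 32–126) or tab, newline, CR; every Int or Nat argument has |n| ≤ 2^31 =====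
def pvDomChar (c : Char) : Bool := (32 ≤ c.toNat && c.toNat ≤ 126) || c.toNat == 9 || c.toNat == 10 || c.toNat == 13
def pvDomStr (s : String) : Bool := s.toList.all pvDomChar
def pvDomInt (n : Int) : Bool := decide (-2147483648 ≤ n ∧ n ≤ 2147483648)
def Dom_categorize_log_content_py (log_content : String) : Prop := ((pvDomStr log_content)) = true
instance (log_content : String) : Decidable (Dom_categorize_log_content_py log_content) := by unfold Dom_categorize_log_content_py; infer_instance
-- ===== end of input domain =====

-- B replaces A's single accumulating pass into four buckets by a label pass plus
-- per-category filter passes joined at the end (alternative decomposition, same cost).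

-- ===== PORT A =====
-- the loop body: append the line to the bucket of the first matching category
def pvStepA (acc : List String × List String × List String × List String) (line : String) :
    List String × List String × List String × List String :=
  if PySem.Str.isIn "ICMP" line then (acc.1 ++ [line], acc.2.1, acc.2.2.1, acc.2.2.2)
  else if PySem.Str.isIn "TCP" line then (acc.1, acc.2.1 ++ [line], acc.2.2.1, acc.2.2.2)
  else if PySem.Str.isIn "UDP" line then (acc.1, acc.2.1, acc.2.2.1 ++ [line], acc.2.2.2)
  else (acc.1, acc.2.1, acc.2.2.1, acc.2.2.2 ++ [line])

-- the dict has four fixed keys in fixed insertion order, so its state is the 4-tuple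
-- of its values and the items() loop is a fold over the four (key, value) pairs in order
def categorize_log_content_py (log_content : String) : String :=
  let st := (PySem.Str.splitlines log_content).foldl pvStepA ([], [], [], [])
  [("ICMP", st.1), ("TCP", st.2.1), ("UDP", st.2.2.1), ("Other", st.2.2.2)].foldl
    (fun s p => if p.2 ≠ [] then
        s ++ "\n--- " ++ p.1 ++ " Packets ---\n" ++ PySem.Str.join "\n" p.2 ++ "\n"
      else s) ""

-- ===== PORT B =====
def pvClassify (line : String) : String :=
  if PySem.Str.isIn "ICMP" line then "ICMP"
  else if PySem.Str.isIn "TCP" line then "TCP"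
  else if PySem.Str.isIn "UDP" line then "UDP"
  else "Other"

def pvSection (labelled : List (String × String)) (cat : String) : String :=
  let lines := (labelled.filter (fun p => p.1 == cat)).map Prod.snd
  if lines ≠ [] then
    "\n--- " ++ cat ++ " Packets ---\n" ++ PySem.Str.join "\n" lines ++ "\n"
  else ""

def categorize_log_content_py_alt (log_content : String) : String :=
  let labelled := (PySem.Str.splitlines log_content).map (fun line => (pvClassify line, line))
  PySem.Str.join "" (["ICMP", "TCP", "UDP", "Other"].map (pvSection labelled))

-- ===== PRECONDITION & SPEC =====
def Spec_categorize_log_content_py (log_content : String) (out : String) : Prop := out = categorize_log_content_py_alt log_content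
instance (log_content : String) (out : String) : Decidable (Spec_categorize_log_content_py log_content out) := by unfold Spec_categorize_log_content_py; infer_instance

-- ===== CLAIM (what is proved, stated in full; the proofs are below) =====
def Claim_equal_categorize_log_content_py : Prop := ∀ (log_content : String), Dom_categorize_log_content_py log_content → Spec_categorize_log_content_py log_content (categorize_log_content_py log_content)

-- ===== LEMMAS AND PROOFS =====

theorem pv_join_empty_nil : PySem.Str.join "" ([] : List String) = "" := rfl

theorem pv_join_empty_cons (x : String) (xs : List String) :
    PySem.Str.join "" (x :: xs) = x ++ PySem.Str.join "" xs := by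
  cases xs <;> simp [PySem.Str.join, PySem.Chars.join, List.intercalate]

-- A's bucket fold computes, for each category, the lines B's classify assigns to it
theorem pv_foldl_step (ls : List String) (a b c d : List String) :
    ls.foldl pvStepA (a, b, c, d) =
      (a ++ ls.filter (fun l => pvClassify l == "ICMP"),
       b ++ ls.filter (fun l => pvClassify l == "TCP"),
       c ++ ls.filter (fun l => pvClassify l == "UDP"),
       d ++ ls.filter (fun l => pvClassify l == "Other")) := by
  induction ls generalizing a b c d with
  | nil => simp
  | cons x xs ih =>
    simp only [List.foldl_cons, pvStepA]
    split_ifs with h1 h2 h3 <;> simp_all [pvClassify]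

-- B's per-category filter of the labelled list is the plain filter by classify
theorem pv_filter_labelled (ls : List String) (cat : String) :
    ((ls.map (fun l => (pvClassify l, l))).filter (fun p => p.1 == cat)).map Prod.snd
      = ls.filter (fun l => pvClassify l == cat) := by
  induction ls with
  | nil => rfl
  | cons x xs ih => by_cases h : pvClassify x == cat <;> simp [h, ih]

-- ===== VERDICT (by name: the statement is the Claim_ definition above) =====
theorem categorize_log_content_py_spec : Claim_equal_categorize_log_content_py := by
  intro s _
  unfold Spec_categorize_log_content_py
  simp only [categorize_log_content_py, categorize_log_content_py_alt, pv_foldl_step,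
    List.nil_append, List.map_cons, List.map_nil, pv_join_empty_cons, pvSection,
    pv_filter_labelled, List.foldl_cons, List.foldl_nil]
  split_ifs <;> simp [pv_join_empty_nil, ← String.toList_inj, String.toList_append, List.append_assoc]
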